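-- pv_equiv track=rewrite | github.com/COL-IU/ClonalTREE2 | myutils.py | compare_columns_directed
-- ===== SOURCE A (Python) =====
-- def compare_columns_directed(c1, c2, ind1, ind2):
--     diff1 = 0
--     count1 = 0
--     diff2 = 0
--     count2 = 0
--     for i in range(0, len(c1)):
--         if c1[i] >= c2[i]:
--             diff1 = diff1 + c1[i] - c2[i]
--             count1 = count1 + 1
--         if c2[i] >= c1[i]:
--             diff2 = diff2 + c2[i] - c1[i]
--             count2 = count2 + 1
--     if count1 == len(c1):
--         return [(ind1, ind2, 0)]
--     if count2 == len(c1):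
--         return [(ind2, ind1, 0)]
--     return [(ind1, ind2, diff2), (ind2, ind1, diff1)]
-- ===== SOURCE B (Python) =====
-- def compare_columns_directed(c1, c2, ind1, ind2):
--     d = [x - y for x, y in zip(c1, c2)]
--     s = sum(d)
--     t = sum(map(abs, d))
--     diff1 = (t + s) // 2
--     diff2 = (t - s) // 2
--     if diff2 == 0:
--         return [(ind1, ind2, 0)]
--     if diff1 == 0:
--         return [(ind2, ind1, 0)]
--     return [(ind1, ind2, diff2), (ind2, ind1, diff1)]
-- ===== Notes on version B (the rewrite author's own statement) =====
-- stated objective: alternative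
-- what changed: B replaces A's conditional accumulation of surpluses and counters by a branch-free arithmetic identity: it computes the signed sum s and absolute sum t of the elementwise differences and recovers diff1=(t+s)//2, diff2=(t-s)//2, deciding dominance from diff2==0 / diff1==0.
import Mathlib
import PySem

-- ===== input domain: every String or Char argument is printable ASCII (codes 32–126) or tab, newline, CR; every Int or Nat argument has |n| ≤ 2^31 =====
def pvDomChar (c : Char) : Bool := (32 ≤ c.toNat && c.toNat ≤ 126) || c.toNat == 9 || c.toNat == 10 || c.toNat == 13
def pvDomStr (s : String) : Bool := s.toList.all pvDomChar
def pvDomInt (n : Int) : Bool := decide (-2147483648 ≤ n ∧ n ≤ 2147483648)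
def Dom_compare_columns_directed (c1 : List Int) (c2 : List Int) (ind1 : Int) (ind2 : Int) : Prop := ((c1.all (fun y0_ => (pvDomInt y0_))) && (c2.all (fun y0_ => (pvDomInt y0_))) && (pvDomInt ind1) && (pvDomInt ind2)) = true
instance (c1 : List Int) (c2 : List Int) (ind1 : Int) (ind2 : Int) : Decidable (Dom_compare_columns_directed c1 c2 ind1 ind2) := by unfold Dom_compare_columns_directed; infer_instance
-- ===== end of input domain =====

-- B replaces A's conditional accumulation of surpluses and counters by the arithmetic identity
-- diff1=(t+s)//2, diff2=(t-s)//2 over the signed sum s and absolute sum t of the elementwise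
-- differences (objective: alternative, branch-free).


-- ===== PORT A =====
-- A's loop body, state (diff1, count1, diff2, count2)
def stepA (s : Int × Int × Int × Int) (x y : Int) : Int × Int × Int × Int :=
  let s := if x ≥ y then (s.1 + x - y, s.2.1 + 1, s.2.2.1, s.2.2.2) else s
  if y ≥ x then (s.1, s.2.1, s.2.2.1 + y - x, s.2.2.2 + 1) else s

-- pyGetD is exact here: Pre_ guarantees every index of the range is in range for both lists
def compare_columns_directed (c1 : List Int) (c2 : List Int) (ind1 : Int) (ind2 : Int) : List (Int × Int × Int) :=
  let s := (PySem.List.pyRange 0 (c1.length : Int) 1).foldl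
    (fun s i => stepA s (PySem.List.pyGetD c1 i 0) (PySem.List.pyGetD c2 i 0)) (0, 0, 0, 0)
  if s.2.1 = (c1.length : Int) then [(ind1, ind2, 0)]
  else if s.2.2.2 = (c1.length : Int) then [(ind2, ind1, 0)]
  else [(ind1, ind2, s.2.2.1), (ind2, ind1, s.1)]

-- ===== PORT B =====
-- Source B: d = elementwise differences, s = sum(d), t = sum(map(abs, d)), then
-- diff1 = (t+s)//2, diff2 = (t-s)//2 (Python '//' = PySem.Int.floordiv)
def compare_columns_directed_alt (c1 : List Int) (c2 : List Int) (ind1 : Int) (ind2 : Int) : List (Int × Int × Int) :=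
  let d := (c1.zip c2).map (fun p => p.1 - p.2)
  let s := d.sum
  let t := (d.map (fun e => |e|)).sum
  let diff1 := PySem.Int.floordiv (t + s) 2
  let diff2 := PySem.Int.floordiv (t - s) 2
  if diff2 = 0 then [(ind1, ind2, 0)]
  else if diff1 = 0 then [(ind2, ind1, 0)]
  else [(ind1, ind2, diff2), (ind2, ind1, diff1)]

-- ===== PRECONDITION & SPEC =====
-- A raises IndexError on c2[i] when len(c2) < len(c1); exactly those inputs are excluded.
def Pre_compare_columns_directed (c1 : List Int) (c2 : List Int) (ind1 : Int) (ind2 : Int) : Prop :=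
  c1.length ≤ c2.length
instance (c1 : List Int) (c2 : List Int) (ind1 : Int) (ind2 : Int) : Decidable (Pre_compare_columns_directed c1 c2 ind1 ind2) := by unfold Pre_compare_columns_directed; infer_instance

def pvWitness_compare_columns_directed : List Int × List Int × Int × Int := ([3, 1, 2], [1, 1, 4], 0, 1)

def Spec_compare_columns_directed (c1 : List Int) (c2 : List Int) (ind1 : Int) (ind2 : Int) (out : List (Int × Int × Int)) : Prop := out = compare_columns_directed_alt c1 c2 ind1 ind2
instance (c1 : List Int) (c2 : List Int) (ind1 : Int) (ind2 : Int) (out : List (Int × Int × Int)) : Decidable (Spec_compare_columns_directed c1 c2 ind1 ind2 out) := by unfold Spec_compare_columns_directed; infer_instance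

-- ===== CLAIM (what is proved, stated in full; the proofs are below) =====
def Claim_equal_compare_columns_directed : Prop := ∀ (c1 : List Int) (c2 : List Int) (ind1 : Int) (ind2 : Int), Dom_compare_columns_directed c1 c2 ind1 ind2 → Pre_compare_columns_directed c1 c2 ind1 ind2 → Spec_compare_columns_directed c1 c2 ind1 ind2 (compare_columns_directed c1 c2 ind1 ind2)
-- ===== LEMMAS AND PROOFS =====

-- the four per-pair accumulations of A's loop, as functions of the zipped column pairs
def accD1 : List (Int × Int) → Int
  | [] => 0
  | p :: l => (if p.1 ≥ p.2 then p.1 - p.2 else 0) + accD1 l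
def accC1 : List (Int × Int) → Int
  | [] => 0
  | p :: l => (if p.1 ≥ p.2 then 1 else 0) + accC1 l
def accD2 : List (Int × Int) → Int
  | [] => 0
  | p :: l => (if p.2 ≥ p.1 then p.2 - p.1 else 0) + accD2 l
def accC2 : List (Int × Int) → Int
  | [] => 0
  | p :: l => (if p.2 ≥ p.1 then 1 else 0) + accC2 l

theorem foldA_eq (l : List (Int × Int)) : ∀ s : Int × Int × Int × Int,
    l.foldl (fun s p => stepA s p.1 p.2) s
      = (s.1 + accD1 l, s.2.1 + accC1 l, s.2.2.1 + accD2 l, s.2.2.2 + accC2 l) := by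
  induction l with
  | nil => intro s; simp [accD1, accC1, accD2, accC2]
  | cons p l ih =>
      intro s
      rw [List.foldl_cons, ih]
      rcases s with ⟨a, b, c, d⟩
      simp only [stepA, accD1, accC1, accD2, accC2]
      split_ifs with h1 h2 h2 <;> simp only [Prod.mk.injEq] <;> omega

theorem count1_iff (l : List (Int × Int)) :
    0 ≤ accD2 l ∧ accC1 l ≤ (l.length : Int) ∧ (accC1 l = (l.length : Int) ↔ accD2 l = 0) := by
  induction l with
  | nil => simp [accC1, accD2]
  | cons p l ih =>
      simp only [accC1, accD2, List.length_cons]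
      split_ifs with h1 h2 h2 <;> push_cast <;> omega

theorem count2_iff (l : List (Int × Int)) :
    0 ≤ accD1 l ∧ accC2 l ≤ (l.length : Int) ∧ (accC2 l = (l.length : Int) ↔ accD1 l = 0) := by
  induction l with
  | nil => simp [accC2, accD1]
  | cons p l ih =>
      simp only [accC2, accD1, List.length_cons]
      split_ifs with h1 h2 h2 <;> push_cast <;> omega

-- B's signed sum s and absolute sum t against A's surplus accumulators
theorem sum_diff_eq (l : List (Int × Int)) :
    (l.map (fun p => p.1 - p.2)).sum = accD1 l - accD2 l := by
  induction l with
  | nil => simp [accD1, accD2]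
  | cons p l ih =>
      simp only [List.map_cons, List.sum_cons, accD1, accD2, ih]
      split_ifs <;> omega

theorem sum_abs_eq (l : List (Int × Int)) :
    ((l.map (fun p => p.1 - p.2)).map (fun e => |e|)).sum = accD1 l + accD2 l := by
  induction l with
  | nil => simp [accD1, accD2]
  | cons p l ih =>
      simp only [List.map_cons, List.sum_cons, accD1, accD2, ih]
      rcases le_or_gt p.2 p.1 with h | h
      · rw [abs_of_nonneg (by omega)]; split_ifs <;> omega
      · rw [abs_of_neg (by omega)]; split_ifs <;> omega

theorem half_double (a : Int) : PySem.Int.floordiv (2 * a) 2 = a := by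
  rw [PySem.Int.floordiv_eq_ediv_of_pos (by omega)]
  exact Int.mul_ediv_cancel_left a (by omega)

-- A's range-and-index loop computes the same fold as a fold over the zipped columns
theorem range_fold_eq_zip {σ : Type} (g : σ → Int → Int → σ) :
    ∀ (n a : Nat) (c1 c2 : List Int), c1.length = a + n → c1.length ≤ c2.length →
    ∀ init : σ,
    (PySem.List.pyRange (a : Int) (c1.length : Int) 1).foldl
        (fun s i => g s (PySem.List.pyGetD c1 i 0) (PySem.List.pyGetD c2 i 0)) init
      = ((c1.drop a).zip (c2.drop a)).foldl (fun s p => g s p.1 p.2) init := by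
  intro n
  induction n with
  | zero =>
      intro a c1 c2 hlen hle init
      rw [PySem.List.pyRange_one_eq_nil (by omega)]
      rw [List.drop_of_length_le (by omega)]
      simp
  | succ n ih =>
      intro a c1 c2 hlen hle init
      have ha1 : a < c1.length := by omega
      have ha2 : a < c2.length := by omega
      rw [PySem.List.pyRange_one_cons (by exact_mod_cast by omega)]
      rw [List.foldl_cons]
      rw [PySem.List.pyGetD_eq_getElem c1 0 (Int.natCast_nonneg a) (by exact_mod_cast ha1)]
      rw [PySem.List.pyGetD_eq_getElem c2 0 (Int.natCast_nonneg a) (by exact_mod_cast ha2)]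
      have hd1 : c1.drop a = c1[a] :: c1.drop (a + 1) := List.drop_eq_getElem_cons ha1
      have hd2 : c2.drop a = c2[a] :: c2.drop (a + 1) := List.drop_eq_getElem_cons ha2
      rw [hd1, hd2]
      simp only [List.zip_cons_cons, List.foldl_cons, Int.toNat_natCast]
      have := ih (a + 1) c1 c2 (by omega) hle
        (g init c1[a] c2[a])
      rw [← this]
      norm_num

-- ===== VERDICT (by name: the statement is the Claim_ definition above) =====
theorem compare_columns_directed_spec : Claim_equal_compare_columns_directed := by
  unfold Claim_equal_compare_columns_directed
  intro c1 c2 ind1 ind2 _ hpre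
  unfold Spec_compare_columns_directed
  unfold compare_columns_directed compare_columns_directed_alt
  have hz : (PySem.List.pyRange ((0 : Nat) : Int) (c1.length : Int) 1).foldl
      (fun s i => stepA s (PySem.List.pyGetD c1 i 0) (PySem.List.pyGetD c2 i 0)) ((0 : Int), (0 : Int), (0 : Int), (0 : Int))
      = ((c1.drop 0).zip (c2.drop 0)).foldl (fun s p => stepA s p.1 p.2) ((0 : Int), (0 : Int), (0 : Int), (0 : Int)) :=
    range_fold_eq_zip stepA c1.length 0 c1 c2 (by omega) hpre _
  simp only [Nat.cast_zero, List.drop_zero] at hz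
  simp only [hz, foldA_eq, zero_add]
  set l := c1.zip c2 with hl
  have hs := sum_diff_eq l
  have ht := sum_abs_eq l
  simp only [hs, ht]
  have e1 : accD1 l + accD2 l + (accD1 l - accD2 l) = 2 * accD1 l := by ring
  have e2 : accD1 l + accD2 l - (accD1 l - accD2 l) = 2 * accD2 l := by ring
  rw [e1, e2, half_double, half_double]
  have hp : c1.length ≤ c2.length := hpre
  have hlen : (l.length : Int) = (c1.length : Int) := by
    simp [hl, List.length_zip]; omega
  have h1 := count1_iff l
  have h2 := count2_iff l
  by_cases hc1 : accC1 l = (c1.length : Int)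
  · have : accD2 l = 0 := (h1.2.2).mp (by omega)
    simp [hc1, this]
  · have hD2 : accD2 l ≠ 0 := fun h => hc1 (by omega)
    rw [if_neg hc1, if_neg hD2]
    by_cases hc2 : accC2 l = (c1.length : Int)
    · have : accD1 l = 0 := (h2.2.2).mp (by omega)
      simp [hc2, this]
    · have hD1 : accD1 l ≠ 0 := fun h => hc2 (by omega)
      rw [if_neg hc2, if_neg hD1]
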